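-- pv_equiv track=rewrite | github.com/Niickviice/Robot_Finding_exit | robot.py | evaluacion
-- ===== SOURCE A (Python) =====
-- def evaluacion(lola):
--     lista = []
--     for i, valor in enumerate(lola, 1):
--         for h in list(range(1, 20, 4)):
--             if i == h:
--                 thom = valor
--                 lista.extend([thom])
--                 hulu = max(lista)
--                 if valor == hulu:
--                     nodo_vatter = lola[i-1:i+4]
--     return nodo_vatter
-- ===== SOURCE B (Python) =====
-- def evaluacion(lola):
--     sampled = [(i, lola[i]) for i in range(0, min(len(lola), 17), 4)]
--     m = max((v for _, v in sampled), default=None)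
--     for i, v in sampled:
--         if v == m:
--             last = i
--     return lola[last:last+5]
-- ===== Notes on version B (the rewrite author's own statement) =====
-- stated objective: faster
-- what changed: A scans every element, testing each 1-based index against range(1,20,4) and maintaining a running max with repeated max() calls; B directly samples the at most five indices 0,4,8,12,16 via range(0, min(len(lola),17), 4), takes their max once, and returns the 5-slice at the last sampled index attaining it.
import Mathlib
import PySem

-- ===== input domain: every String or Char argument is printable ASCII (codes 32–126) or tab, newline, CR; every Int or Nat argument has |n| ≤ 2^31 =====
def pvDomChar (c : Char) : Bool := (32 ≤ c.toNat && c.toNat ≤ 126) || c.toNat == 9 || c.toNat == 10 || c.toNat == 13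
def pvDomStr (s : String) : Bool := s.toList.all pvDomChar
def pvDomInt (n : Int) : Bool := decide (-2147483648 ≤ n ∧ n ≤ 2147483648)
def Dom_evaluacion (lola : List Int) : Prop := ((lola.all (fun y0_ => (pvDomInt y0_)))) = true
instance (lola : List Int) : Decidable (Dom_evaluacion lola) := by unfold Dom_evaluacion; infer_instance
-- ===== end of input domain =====

-- B replaces A's full scan with running max by directly sampling indices 0,4,8,12,16, taking their max once,
-- and slicing at the last sampled index attaining it; measured asymptotically faster (O(1) samples vs O(n) scan).


-- ===== PORT A =====
def evaluacion (lola : List Int) : List Int :=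
  let st := (PySem.List.enumerate lola 1).foldl
    (fun (st : List Int × Option (List Int)) p =>
      (PySem.List.pyRange 1 20 4).foldl
        (fun st h =>
          if p.1 == h then
            let thom := p.2
            let lista := st.1 ++ [thom]
            let hulu := (PySem.List.max? lista (fun x => x)).getD 0
            if p.2 == hulu then
              (lista, some (PySem.List.slice lola (some (p.1 - 1)) (some (p.1 + 4))))
            else (lista, st.2)
          else st) st)
    (([], none) : List Int × Option (List Int))
  -- 'return nodo_vatter' raises UnboundLocalError when never assigned (empty input): excluded by Pre_
  st.2.getD []

-- ===== PORT B =====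
def evaluacion_alt (lola : List Int) : List Int :=
  let sampled := (PySem.List.pyRange 0 (min ((lola.length : Int)) 17) 4).map
    (fun i => (i, (PySem.List.pyGet? lola i).getD 0))
  let m := PySem.List.max? (sampled.map (fun p => p.2)) (fun v => v)
  let last := sampled.foldl (fun acc p => if some p.2 == m then some p.1 else acc) (none : Option Int)
  -- 'return lola[last:last+5]' raises UnboundLocalError when last was never assigned (empty input): excluded by Pre_
  match last with
  | some i => PySem.List.slice lola (some i) (some (i + 5))
  | none => []

-- ===== PRECONDITION & SPEC =====
-- Pre_ excludes only the empty list, on which both Pythons raise UnboundLocalError.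
def Pre_evaluacion (lola : List Int) : Prop := lola ≠ []
instance (lola : List Int) : Decidable (Pre_evaluacion lola) := by unfold Pre_evaluacion; infer_instance
def pvWitness_evaluacion : List Int := ([3, 1, 2])
def Spec_evaluacion (lola : List Int) (out : List Int) : Prop := out = evaluacion_alt lola
instance (lola : List Int) (out : List Int) : Decidable (Spec_evaluacion lola out) := by unfold Spec_evaluacion; infer_instance

-- ===== CLAIM (what is proved, stated in full; the proofs are below) =====
def Claim_equal_evaluacion : Prop := ∀ (lola : List Int), Dom_evaluacion lola → Pre_evaluacion lola → Spec_evaluacion lola (evaluacion lola)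

-- ===== LEMMAS AND PROOFS =====

-- the sampled (0-based index, value) pairs both programs really depend on
def pvS (lola : List Int) : List (Int × Int) :=
  (PySem.List.pyRange 0 (min ((lola.length : Int)) 17) 4).map
    (fun i => (i, (PySem.List.pyGet? lola i).getD 0))

-- A's effective step on a sampled pair (0-based index in p.1)
def pvStep (lola : List Int) (st : List Int × Option (List Int)) (p : Int × Int) :
    List Int × Option (List Int) :=
  (st.1 ++ [p.2],
   if p.2 = (PySem.List.max? (st.1 ++ [p.2]) (fun x => x)).getD 0
   then some (PySem.List.slice lola (some p.1) (some (p.1 + 5))) else st.2)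

def pvM (S : List (Int × Int)) : Option Int := PySem.List.max? (S.map (fun p => p.2)) (fun v => v)
def pvLast (m : Option Int) (S : List (Int × Int)) : Option Int :=
  S.foldl (fun acc p => if some p.2 == m then some p.1 else acc) none
def pvSlice (lola : List Int) (i : Int) : List Int := PySem.List.slice lola (some i) (some (i + 5))

def pvC (p : Int × Int) : Bool := p.1 == 1 || p.1 == 5 || p.1 == 9 || p.1 == 13 || p.1 == 17
def pvCI (j : Int) : Bool := j == 0 || j == 4 || j == 8 || j == 12 || j == 16

-- A's 1-based step, exactly as in the port
def pvStepA (lola : List Int) (st : List Int × Option (List Int)) (p : Int × Int) :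
    List Int × Option (List Int) :=
  let lista := st.1 ++ [p.2]
  let hulu := (PySem.List.max? lista (fun x => x)).getD 0
  if p.2 == hulu then
    (lista, some (PySem.List.slice lola (some (p.1 - 1)) (some (p.1 + 4))))
  else (lista, st.2)

lemma pvRange1204 : PySem.List.pyRange 1 20 4 = [1, 5, 9, 13, 17] := by decide

lemma pvInner (lola : List Int) (p : Int × Int) (st : List Int × Option (List Int)) :
    ([1, 5, 9, 13, 17] : List Int).foldl
      (fun st h =>
        if p.1 == h then
          let thom := p.2
          let lista := st.1 ++ [thom]
          let hulu := (PySem.List.max? lista (fun x => x)).getD 0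
          if p.2 == hulu then
            (lista, some (PySem.List.slice lola (some (p.1 - 1)) (some (p.1 + 4))))
          else (lista, st.2)
        else st) st
    = if pvC p then pvStepA lola st p else st := by
  by_cases h1 : p.1 = 1
  · simp [List.foldl, pvC, pvStepA, h1]
  · by_cases h2 : p.1 = 5
    · simp [List.foldl, pvC, pvStepA, h2]
    · by_cases h3 : p.1 = 9
      · simp [List.foldl, pvC, pvStepA, h3]
      · by_cases h4 : p.1 = 13
        · simp [List.foldl, pvC, pvStepA, h4]
        · by_cases h5 : p.1 = 17
          · simp [List.foldl, pvC, pvStepA, h5]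
          · simp [List.foldl, pvC, h1, h2, h3, h4, h5]

lemma pvEnumShift {α : Type} (xs : List α) (s : Int) :
    PySem.List.enumerate xs (s + 1) = (PySem.List.enumerate xs s).map (fun p => (p.1 + 1, p.2)) := by
  induction xs generalizing s with
  | nil => simp [PySem.List.enumerate_nil]
  | cons x t ih =>
    rw [PySem.List.enumerate_cons, PySem.List.enumerate_cons]
    simp [List.map_cons, ← ih]

lemma pvIdxFilter (n : Nat) :
    (PySem.List.pyRange 0 (n : Int) 1).filter pvCI
      = PySem.List.pyRange 0 (min ((n : Int)) 17) 4 := by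
  induction n with
  | zero => decide
  | succ k ih =>
    have hc : ((k + 1 : Nat) : Int) = (k : Int) + 1 := by push_cast; ring
    rw [hc, PySem.List.pyRange_one_succ_right (by positivity), List.filter_append, ih]
    by_cases hk : k < 17
    · interval_cases k <;> decide
    · have h1 : pvCI (k : Int) = false := by
        rw [pvCI]; simp only [Bool.or_eq_false_iff, beq_eq_false_iff_ne, ne_eq]; omega
      have h2 : min ((k : Int) + 1) 17 = min ((k : Int)) 17 := by omega
      simp [h1, h2]

lemma pvFst (lola : List Int) (S : List (Int × Int)) (init : List Int × Option (List Int)) :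
    (S.foldl (pvStep lola) init).1 = init.1 ++ S.map (fun p => p.2) := by
  induction S generalizing init with
  | nil => simp
  | cons p t ih => simp [List.foldl_cons, pvStep, ih]

lemma pvMaxAppend (xs : List Int) (v : Int) :
    PySem.List.max? (xs ++ [v]) (fun x => x)
      = some (match PySem.List.max? xs (fun x => x) with | none => v | some m => max m v) := by
  cases xs with
  | nil => rw [List.nil_append, PySem.List.max?_id_cons]; rfl
  | cons a t =>
    rw [List.cons_append, PySem.List.max?_id_cons, PySem.List.max?_id_cons, List.foldl_append]
    simp

lemma pvCore (lola : List Int) (S : List (Int × Int)) :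
    (S.foldl (pvStep lola) (([], none) : List Int × Option (List Int))).2
      = (pvLast (pvM S) S).map (pvSlice lola) := by
  induction S using List.reverseRecOn with
  | nil => rfl
  | append_singleton S p ih =>
    have hfst : (S.foldl (pvStep lola) (([], none) : List Int × Option (List Int))).1
        = S.map (fun q => q.2) := by simpa using pvFst lola S ([], none)
    have hmax := pvMaxAppend (S.map (fun q => q.2)) p.2
    rw [List.foldl_append]
    simp only [List.foldl_cons, List.foldl_nil]
    have hMapp : pvM (S ++ [p])
        = some (match pvM S with | none => p.2 | some m => max m p.2) := by
      rw [pvM, List.map_append]; exact hmax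
    set m' : Int := (match pvM S with | none => p.2 | some m => max m p.2) with hm'
    have hLapp : pvLast (pvM (S ++ [p])) (S ++ [p])
        = if p.2 = m' then some p.1 else pvLast (some m') S := by
      rw [hMapp, pvLast, List.foldl_append]
      simp only [List.foldl_cons, List.foldl_nil]
      by_cases hc : p.2 = m'
      · rw [if_pos hc]; simp [hc]
      · rw [if_neg hc]
        have hb : (some p.2 == some m') = false := by simp [hc]
        rw [hb]
        rfl
    rw [hLapp]
    by_cases hpc : p.2 = m'
    · -- the last sample attains the (new) maximum: both sides slice at p.1
      simp only [pvStep]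
      rw [hfst, hmax]
      rw [show (PySem.List.max? (List.map (fun q => q.2) S) fun x => x) = pvM S from rfl, ← hm']
      simp only [Option.getD_some]
      rw [if_pos hpc, if_pos hpc]
      simp [pvSlice]
    · -- the last sample is below the maximum: both sides are unchanged
      rcases hS : pvM S with _ | m
      · exfalso
        rw [hm', hS] at hpc
        exact hpc rfl
      · have hm'm : m' = m := by
          rw [hm', hS]
          rcases max_choice m p.2 with h | h
          · exact h
          · exfalso; apply hpc; rw [hm', hS]; exact h.symm
        simp only [pvStep]
        rw [hfst, hmax]
        rw [show (PySem.List.max? (List.map (fun q => q.2) S) fun x => x) = pvM S from rfl, ← hm']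
        simp only [Option.getD_some]
        rw [if_neg hpc, if_neg hpc, ih, hm'm, ← hS]

lemma pvCshift (j v : Int) : pvC (j + 1, v) = pvCI j := by
  rw [Bool.eq_iff_iff]
  simp only [pvC, pvCI, Bool.or_eq_true, beq_iff_eq]
  omega

lemma pvStepA_shift (lola : List Int) (st : List Int × Option (List Int)) (q : Int × Int) :
    pvStepA lola st (q.1 + 1, q.2) = pvStep lola st q := by
  simp only [pvStepA, pvStep, beq_iff_eq, add_sub_cancel_right]
  have h45 : q.1 + 1 + 4 = q.1 + 5 := by ring
  rw [h45]
  split <;> rfl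

lemma pvA_eq (lola : List Int) :
    evaluacion lola = ((pvLast (pvM (pvS lola)) (pvS lola)).map (pvSlice lola)).getD [] := by
  have hfil : (PySem.List.enumerate lola 1).filter pvC
      = (pvS lola).map (fun q => (q.1 + 1, q.2)) := by
    have h01 : (1 : Int) = 0 + 1 := by ring
    rw [h01, pvEnumShift lola 0]
    rw [show PySem.List.enumerate lola 0 = PySem.List.enumerate lola from rfl]
    rw [PySem.List.enumerate_eq_map_pyRange lola 0, List.map_map, List.filter_map]
    have hpred : ∀ j ∈ PySem.List.pyRange 0 (PySem.List.len lola),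
        (pvC ∘ ((fun p => (p.1 + 1, p.2)) ∘ fun j => (j, PySem.List.pyGetD lola j 0))) j
          = pvCI j := by
      intro j _
      exact pvCshift j (PySem.List.pyGetD lola j 0)
    rw [List.filter_congr hpred]
    rw [show PySem.List.len lola = ((lola.length : Int)) from by simp [PySem.List.len_eq],
        pvIdxFilter lola.length]
    rw [pvS, List.map_map]
    rfl
  rw [evaluacion]
  simp only [pvRange1204, pvInner]
  rw [← List.foldl_filter, hfil, List.foldl_map]
  have hstep : (fun (st : List Int × Option (List Int)) (q : Int × Int) =>
      pvStepA lola st (q.1 + 1, q.2)) = pvStep lola := by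
    funext st q
    exact pvStepA_shift lola st q
  rw [hstep, pvCore]

lemma pvB_eq (lola : List Int) :
    evaluacion_alt lola = ((pvLast (pvM (pvS lola)) (pvS lola)).map (pvSlice lola)).getD [] := by
  have h : ∀ (o : Option Int),
      (match o with
       | some i => PySem.List.slice lola (some i) (some (i + 5))
       | none => []) = (o.map (pvSlice lola)).getD [] := by
    intro o; cases o <;> rfl
  exact h (pvLast (pvM (pvS lola)) (pvS lola))

-- ===== VERDICT (by name: the statement is the Claim_ definition above) =====
theorem evaluacion_spec : Claim_equal_evaluacion := by
  intro lola _ _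
  unfold Spec_evaluacion
  rw [pvA_eq, pvB_eq]
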